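-- pv_equiv track=rewrite | github.com/ericosiu/ai-marketing-skills | dtc-content-ops/scripts/product_rotation.py | should_include_cross_sell
-- ===== SOURCE A (Python) =====
-- def should_include_cross_sell(rotation, frequency=3):
--     """
--     Check if this post should include a cross-sell CTA.
--     Default: every 3rd post includes a cross-sell.
--     """
--     log = rotation.get("rotation_log", [])
--     posts_since_cta = 0
--     for entry in reversed(log):
--         if entry.get("includes_cross_sell_cta"):
--             break
--         posts_since_cta += 1
--     return posts_since_cta >= (frequency - 1)
-- ===== SOURCE B (Python) =====
-- def should_include_cross_sell(rotation, frequency=3):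
--     log = rotation.get("rotation_log", [])
--     cta_positions = [i for i, entry in enumerate(log)
--                      if entry.get("includes_cross_sell_cta")]
--     last = cta_positions[-1] if cta_positions else -1
--     return len(log) - 1 - last >= frequency - 1
-- ===== Notes on version B (the rewrite author's own statement) =====
-- stated objective: alternative
-- what changed: Replaces the backward scan-with-break counter by building the list of CTA positions in one forward enumerate pass and computing posts-since-CTA as a closed-form arithmetic expression from the last such position (-1 sentinel when none).
import Mathlib
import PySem

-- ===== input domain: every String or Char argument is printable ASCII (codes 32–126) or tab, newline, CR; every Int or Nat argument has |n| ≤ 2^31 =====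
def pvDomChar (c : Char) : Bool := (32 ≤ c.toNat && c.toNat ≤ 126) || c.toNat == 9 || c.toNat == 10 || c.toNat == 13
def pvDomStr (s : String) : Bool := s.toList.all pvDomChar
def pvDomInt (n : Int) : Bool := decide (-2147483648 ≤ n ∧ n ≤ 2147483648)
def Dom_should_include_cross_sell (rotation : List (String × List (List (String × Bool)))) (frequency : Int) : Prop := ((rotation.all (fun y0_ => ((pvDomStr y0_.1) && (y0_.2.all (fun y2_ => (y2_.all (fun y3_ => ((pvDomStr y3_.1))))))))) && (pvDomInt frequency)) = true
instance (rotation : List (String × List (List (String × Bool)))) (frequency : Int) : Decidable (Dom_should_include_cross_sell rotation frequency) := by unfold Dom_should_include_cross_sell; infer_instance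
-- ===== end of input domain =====

-- B replaces A's backward scan-with-break counter by one forward enumerate-filter pass
-- collecting CTA positions, then a closed-form arithmetic check from the last position
-- (alternative decomposition, same cost).


-- ===== PORT A =====
-- entry.get("includes_cross_sell_cta")  (missing key -> None, falsy; Bool value used for truthiness)
def pvCtaA (e : List (String × Bool)) : Bool :=
  (PySem.Dict.mk e).getD "includes_cross_sell_cta" false

-- the 'for entry in reversed(log): if …: break; posts += 1' loop, on the reversed list
def pvLoopA : List (List (String × Bool)) → Int
  | [] => 0
  | e :: rest => if pvCtaA e then 0 else pvLoopA rest + 1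

def should_include_cross_sell (rotation : List (String × List (List (String × Bool)))) (frequency : Int) : Bool :=
  let log := (PySem.Dict.mk rotation).getD "rotation_log" []
  let posts_since_cta := pvLoopA log.reverse
  decide (frequency - 1 ≤ posts_since_cta)

-- ===== PORT B =====
def should_include_cross_sell_alt (rotation : List (String × List (List (String × Bool)))) (frequency : Int) : Bool :=
  let log := (PySem.Dict.mk rotation).getD "rotation_log" []
  let cta_positions :=
    ((PySem.List.enumerate log 0).filter
      (fun p => (PySem.Dict.mk p.2).getD "includes_cross_sell_cta" false)).map (·.1)
  let last : Int :=
    match PySem.List.pyGet? cta_positions (-1) with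
    | some v => v
    | none => -1
  decide ((log.length : Int) - 1 - last ≥ frequency - 1)

-- ===== PRECONDITION & SPEC =====
def Spec_should_include_cross_sell (rotation : List (String × List (List (String × Bool)))) (frequency : Int) (out : Bool) : Prop := out = should_include_cross_sell_alt rotation frequency
instance (rotation : List (String × List (List (String × Bool)))) (frequency : Int) (out : Bool) : Decidable (Spec_should_include_cross_sell rotation frequency out) := by unfold Spec_should_include_cross_sell; infer_instance

-- ===== CLAIM (what is proved, stated in full; the proofs are below) =====
def Claim_equal_should_include_cross_sell : Prop := ∀ (rotation : List (String × List (List (String × Bool)))) (frequency : Int), Dom_should_include_cross_sell rotation frequency → Spec_should_include_cross_sell rotation frequency (should_include_cross_sell rotation frequency)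

-- ===== LEMMAS AND PROOFS =====

-- B's predicate and last-CTA-position, named for the proofs (definitionally what the port inlines)
def pvPredB (p : Int × List (String × Bool)) : Bool :=
  (PySem.Dict.mk p.2).getD "includes_cross_sell_cta" false

def pvLastB (log : List (List (String × Bool))) : Int :=
  match PySem.List.pyGet? (((PySem.List.enumerate log 0).filter pvPredB).map (·.1)) (-1) with
  | some v => v
  | none => -1

theorem pvEnumerate_append (l : List (List (String × Bool))) (e : List (String × Bool)) (s : Int) :
    PySem.List.enumerate (l ++ [e]) s = PySem.List.enumerate l s ++ [(s + l.length, e)] := by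
  induction l generalizing s with
  | nil => simp [PySem.List.enumerate_cons, PySem.List.enumerate_nil]
  | cons x xs ih =>
    simp [PySem.List.enumerate_cons, ih]
    ring_nf

-- A's backward counter equals the closed form from B's last CTA position.
theorem pvLoopA_reverse_eq (log : List (List (String × Bool))) :
    pvLoopA log.reverse = (log.length : Int) - 1 - pvLastB log := by
  induction log using List.reverseRecOn with
  | nil => simp [pvLoopA, pvLastB, PySem.List.enumerate_nil]; rfl
  | append_singleton l e ih =>
    rw [List.reverse_append]
    simp only [List.reverse_singleton, List.singleton_append]
    by_cases h : pvCtaA e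
    · have hp : pvPredB ((l.length : Int), e) = true := h
      have : pvLastB (l ++ [e]) = l.length := by
        simp [pvLastB, pvEnumerate_append, List.filter_append, hp,
          PySem.List.pyGet?_neg_one_append_singleton]
      rw [this, pvLoopA, if_pos h]
      simp
    · have hp : pvPredB ((l.length : Int), e) = false := by
        simpa [pvPredB, pvCtaA] using h
      have : pvLastB (l ++ [e]) = pvLastB l := by
        simp [pvLastB, pvEnumerate_append, List.filter_append, hp]
      rw [pvLoopA, if_neg h, ih, this]
      simp
      ring

theorem pvMain (log : List (List (String × Bool))) (f : Int) :
    decide (f - 1 ≤ pvLoopA log.reverse) = decide ((log.length : Int) - 1 - pvLastB log ≥ f - 1) := by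
  rw [pvLoopA_reverse_eq]

-- ===== VERDICT (by name: the statement is the Claim_ definition above) =====
theorem should_include_cross_sell_spec : Claim_equal_should_include_cross_sell := by
  intro rotation frequency _
  exact pvMain ((PySem.Dict.mk rotation).getD "rotation_log" []) frequency
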